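-- pv_equiv track=rewrite | github.com/s1mplethings/ctcp | tools/providers/project_generation_domain_contract.py | _signal_contains
-- ===== SOURCE A (Python) =====
-- def _normalize_text(text: str) -> str:
--     return " ".join(str(text or "").replace("\r", " ").replace("\n", " ").split()).strip().lower()
--
-- def _signal_contains(signal_text: str, token: str) -> bool:
--     normalized_signal = _normalize_text(signal_text)
--     normalized_token = _normalize_text(token)
--     if not normalized_signal or not normalized_token:
--         return False
--     if any(ord(ch) > 127 for ch in normalized_token):
--         return normalized_token in normalized_signal
--     return f" {normalized_token} " in f" {normalized_signal} "
-- ===== SOURCE B (Python) =====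
-- def _normalize_text(text: str) -> str:
--     return " ".join(str(text or "").replace("\r", " ").replace("\n", " ").split()).strip().lower()
--
-- def _signal_contains(signal_text: str, token: str) -> bool:
--     normalized_signal = _normalize_text(signal_text)
--     normalized_token = _normalize_text(token)
--     if not normalized_signal or not normalized_token:
--         return False
--     if any(ord(ch) > 127 for ch in normalized_token):
--         return normalized_token in normalized_signal
--     sig_words = normalized_signal.split()
--     tok_words = normalized_token.split()
--     k = len(tok_words)
--     return any(sig_words[i:i + k] == tok_words for i in range(len(sig_words) - k + 1))
-- ===== Notes on version B (the rewrite author's own statement) =====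
-- stated objective: alternative
-- what changed: The ASCII word-containment test is decided by splitting both normalized strings into word lists and sliding a window of len(token_words) over the signal's word list, instead of the padded-substring trick ' token ' in ' signal '.
import Mathlib
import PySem

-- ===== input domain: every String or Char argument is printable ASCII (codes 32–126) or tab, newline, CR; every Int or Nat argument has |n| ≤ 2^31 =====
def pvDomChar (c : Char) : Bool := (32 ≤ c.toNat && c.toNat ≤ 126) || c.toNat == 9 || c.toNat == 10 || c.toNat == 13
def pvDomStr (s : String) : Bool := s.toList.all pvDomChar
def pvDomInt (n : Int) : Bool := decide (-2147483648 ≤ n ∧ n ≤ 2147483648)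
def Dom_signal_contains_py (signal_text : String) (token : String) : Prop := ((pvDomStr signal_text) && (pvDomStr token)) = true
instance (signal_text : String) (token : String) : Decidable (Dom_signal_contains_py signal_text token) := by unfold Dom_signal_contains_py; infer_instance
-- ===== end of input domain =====

-- B replaces A's padded-substring trick (" token " in " signal ") by splitting both normalized
-- strings into word lists and sliding a window over the signal's word list (objective: alternative).

-- ===== PORT A =====
-- _normalize_text(text): " ".join(str(text or "").replace("\r"," ").replace("\n"," ").split()).strip().lower()
-- (str(text or "") is the identity on str arguments, so it is ported as the string itself)
def pvNormChars (s : List Char) : List Char :=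
  PySem.Chars.lower (PySem.Chars.strip (PySem.Chars.join [' ']
    (PySem.Chars.split₀ (PySem.Chars.replace (PySem.Chars.replace s ['\r'] [' ']) ['\n'] [' ']))))

def signal_contains_py (signal_text : String) (token : String) : Bool :=
  let ns := pvNormChars signal_text.toList
  let nt := pvNormChars token.toList
  if ns.isEmpty || nt.isEmpty then false
  else if nt.any (fun c => 127 < c.toNat) then PySem.Chars.isIn nt ns
  else PySem.Chars.isIn (' ' :: nt ++ [' ']) (' ' :: ns ++ [' '])

-- ===== PORT B =====
-- any(sig_words[i:i+k] == tok_words for i in range(len(sig_words) - k + 1));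
-- for k ≥ 1 the Nat expression ws.length + 1 - vs.length equals max(0, len(sig_words) - k + 1)
def pvSublistWin (vs ws : List (List Char)) : Bool :=
  (List.range (ws.length + 1 - vs.length)).any (fun i => (ws.drop i).take vs.length == vs)

def signal_contains_py_alt (signal_text : String) (token : String) : Bool :=
  let ns := pvNormChars signal_text.toList
  let nt := pvNormChars token.toList
  if ns.isEmpty || nt.isEmpty then false
  else if nt.any (fun c => 127 < c.toNat) then PySem.Chars.isIn nt ns
  else pvSublistWin (PySem.Chars.split₀ nt) (PySem.Chars.split₀ ns)

-- ===== PRECONDITION & SPEC =====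
def Spec_signal_contains_py (signal_text : String) (token : String) (out : Bool) : Prop := out = signal_contains_py_alt signal_text token
instance (signal_text : String) (token : String) (out : Bool) : Decidable (Spec_signal_contains_py signal_text token out) := by unfold Spec_signal_contains_py; infer_instance

-- ===== CLAIM (what is proved, stated in full; the proofs are below) =====
def Claim_equal_signal_contains_py : Prop := ∀ (signal_text : String) (token : String), Dom_signal_contains_py signal_text token → Spec_signal_contains_py signal_text token (signal_contains_py signal_text token)

-- ===== LEMMAS AND PROOFS =====

-- a "word list": every word is nonempty and free of whitespace characters
def pvWds (ws : List (List Char)) : Prop :=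
  ∀ w ∈ ws, w ≠ [] ∧ ∀ c ∈ w, PySem.Chars.isspace c = false

-- ' '-terminated join: pvG [w1,…,wn] = w1 ++ ' ' :: … ++ wn ++ [' ']
def pvG : List (List Char) → List Char
  | [] => []
  | w :: ws => w ++ ' ' :: pvG ws

theorem pvG_append (a b : List (List Char)) : pvG (a ++ b) = pvG a ++ pvG b := by
  induction a with
  | nil => simp [pvG]
  | cons w a ih => simp [pvG, ih]

theorem pvG_eq_join (ws : List (List Char)) (h : ws ≠ []) :
    PySem.Chars.join [' '] ws ++ [' '] = pvG ws := by
  induction ws with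
  | nil => simp at h
  | cons w ws ih =>
    cases ws with
    | nil => simp [pvG, PySem.Chars.join_singleton]
    | cons v ws' =>
      rw [PySem.Chars.join_cons_cons]
      simp only [pvG, List.append_assoc, List.cons_append, List.nil_append]
      rw [ih (by simp)]
      simp [pvG]

theorem pvG_concat_space (a : List (List Char)) (h : a ≠ []) : ∃ X, pvG a = X ++ [' '] := by
  induction a with
  | nil => simp at h
  | cons w a ih =>
    cases a with
    | nil => exact ⟨w, by simp [pvG]⟩
    | cons v a' =>
      obtain ⟨X, hX⟩ := ih (by simp)
      simp only [pvG] at hX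
      exact ⟨w ++ ' ' :: X, by simp [pvG, hX]⟩

-- split₀.go equations and invariants
theorem pvGo_nonspace (c : Char) (rest cur : List Char) (acc : List (List Char))
    (h : PySem.Chars.isspace c = false) :
    PySem.Chars.split₀.go (c :: rest) cur acc = PySem.Chars.split₀.go rest (c :: cur) acc := by
  simp [PySem.Chars.split₀.go, h]

theorem pvGo_space (rest cur : List Char) (acc : List (List Char)) (h : cur ≠ []) :
    PySem.Chars.split₀.go (' ' :: rest) cur acc
      = PySem.Chars.split₀.go rest [] (cur.reverse :: acc) := by
  have hs : PySem.Chars.isspace ' ' = true := by decide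
  have he : cur.isEmpty = false := by simpa [List.isEmpty_iff] using h
  simp [PySem.Chars.split₀.go, hs, he]

theorem pvGo_nil (cur : List Char) (acc : List (List Char)) (h : cur ≠ []) :
    PySem.Chars.split₀.go [] cur acc = (cur.reverse :: acc).reverse := by
  have he : cur.isEmpty = false := by simpa [List.isEmpty_iff] using h
  simp [PySem.Chars.split₀.go, he]

theorem pvGo_word (w : List Char) (rest cur : List Char) (acc : List (List Char))
    (hw : ∀ c ∈ w, PySem.Chars.isspace c = false) :
    PySem.Chars.split₀.go (w ++ rest) cur acc
      = PySem.Chars.split₀.go rest (w.reverse ++ cur) acc := by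
  induction w generalizing cur with
  | nil => simp
  | cons c w ih =>
    rw [List.cons_append, pvGo_nonspace c _ _ _ (hw c (by simp)),
        ih _ (fun d hd => hw d (by simp [hd]))]
    simp

theorem pvGo_join (ws : List (List Char)) (acc : List (List Char)) (h : pvWds ws) :
    PySem.Chars.split₀.go (PySem.Chars.join [' '] ws) [] acc = acc.reverse ++ ws := by
  induction ws generalizing acc with
  | nil => simp [PySem.Chars.join_nil, PySem.Chars.split₀.go]
  | cons w ws ih =>
    obtain ⟨hw, hwsp⟩ := h w (by simp)
    cases ws with
    | nil =>
      rw [PySem.Chars.join_singleton, show w = w ++ [] by simp, pvGo_word w [] [] acc hwsp]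
      rw [pvGo_nil _ _ (by simp [hw])]
      simp
    | cons v ws' =>
      rw [PySem.Chars.join_cons_cons, List.append_assoc, pvGo_word w _ [] acc hwsp,
          List.singleton_append, pvGo_space _ _ _ (by simp [hw])]
      rw [ih _ (fun u hu => h u (by simp [hu]))]
      simp

theorem split₀_join (ws : List (List Char)) (h : pvWds ws) :
    PySem.Chars.split₀ (PySem.Chars.join [' '] ws) = ws := by
  rw [PySem.Chars.split₀, pvGo_join ws [] h]
  simp

theorem pvGo_wds (s cur : List Char) (acc : List (List Char))
    (hcur : ∀ c ∈ cur, PySem.Chars.isspace c = false)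
    (hacc : ∀ w ∈ acc, w ≠ [] ∧ ∀ c ∈ w, PySem.Chars.isspace c = false) :
    pvWds (PySem.Chars.split₀.go s cur acc) := by
  induction s generalizing cur acc with
  | nil =>
    intro w hw
    by_cases hc : cur = []
    · subst hc
      simp [PySem.Chars.split₀.go] at hw
      exact hacc w hw
    · rw [pvGo_nil _ _ hc] at hw
      simp at hw
      rcases hw with hw | hw
      · exact hacc w hw
      · subst hw
        exact ⟨by simpa using hc, fun c hc' => hcur c (by simpa using hc')⟩
  | cons c s ih =>
    by_cases hsp : PySem.Chars.isspace c = true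
    · by_cases hc : cur = []
      · subst hc
        have : PySem.Chars.split₀.go (c :: s) [] acc = PySem.Chars.split₀.go s [] acc := by
          simp [PySem.Chars.split₀.go, hsp]
        rw [this]; exact ih [] acc (by simp) hacc
      · have he : cur.isEmpty = false := by simpa [List.isEmpty_iff] using hc
        have : PySem.Chars.split₀.go (c :: s) cur acc
            = PySem.Chars.split₀.go s [] (cur.reverse :: acc) := by
          simp [PySem.Chars.split₀.go, hsp, he]
        rw [this]
        refine ih [] _ (by simp) ?_
        intro w hw
        simp at hw
        rcases hw with hw | hw
        · subst hw
          exact ⟨by simpa using hc, fun d hd => hcur d (by simpa using hd)⟩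
        · exact hacc w hw
    · rw [pvGo_nonspace c _ _ _ (by simpa using hsp)]
      refine ih _ _ ?_ hacc
      intro d hd
      rcases List.mem_cons.mp hd with hd | hd
      · subst hd; simpa using hsp
      · exact hcur d hd

theorem split₀_wds (s : List Char) : pvWds (PySem.Chars.split₀ s) := by
  rw [PySem.Chars.split₀]
  exact pvGo_wds s [] [] (by simp) (by simp)

-- lowering a word list preserves the word-list property and commutes with joining
theorem lowerChar_isspace (c : Char) : PySem.Chars.isspace (PySem.Chars.lowerChar c) = PySem.Chars.isspace c := by
  rw [PySem.Chars.lowerChar]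
  by_cases h : PySem.Chars.isupper c = true
  · rw [if_pos h]
    have h1 : 65 ≤ c.toNat ∧ c.toNat ≤ 90 := by
      rw [PySem.Chars.isupper] at h
      simp [Char.le_def] at h
      exact ⟨h.1, h.2⟩
    have hv : (c.toNat + 32).isValidChar := by
      left; omega
    have ht : (Char.ofNat (c.toNat + 32)).toNat = c.toNat + 32 := by
      rw [Char.toNat_ofNat, if_pos hv]
    have ha : PySem.Chars.isspace c = false := by
      simp [PySem.Chars.isspace]; omega
    have hb : PySem.Chars.isspace (Char.ofNat (c.toNat + 32)) = false := by
      simp [PySem.Chars.isspace, ht]; omega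
    rw [ha, hb]
  · rw [if_neg h]

theorem lower_wds (ws : List (List Char)) (h : pvWds ws) : pvWds (ws.map PySem.Chars.lower) := by
  intro w hw
  simp at hw
  obtain ⟨v, hv, rfl⟩ := hw
  obtain ⟨hne, hsp⟩ := h v hv
  refine ⟨by simpa [PySem.Chars.lower] using hne, ?_⟩
  intro c hc
  simp [PySem.Chars.lower] at hc
  obtain ⟨d, hd, rfl⟩ := hc
  rw [lowerChar_isspace]
  exact hsp d hd

theorem lower_join (ws : List (List Char)) :
    PySem.Chars.lower (PySem.Chars.join [' '] ws) = PySem.Chars.join [' '] (ws.map PySem.Chars.lower) := by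
  induction ws with
  | nil => simp [PySem.Chars.join_nil, PySem.Chars.lower]
  | cons w ws ih =>
    cases ws with
    | nil => simp [PySem.Chars.join_singleton]
    | cons v ws' =>
      rw [PySem.Chars.join_cons_cons, List.map_cons, List.map_cons, PySem.Chars.join_cons_cons,
          ← List.map_cons, ← ih]
      simp [PySem.Chars.lower, show PySem.Chars.lowerChar ' ' = ' ' from by decide]

-- strip is the identity on a nonempty join of words
theorem join_head (ws : List (List Char)) (h : pvWds ws) (hne : ws ≠ []) :
    ∃ c t, PySem.Chars.join [' '] ws = c :: t ∧ PySem.Chars.isspace c = false := by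
  cases ws with
  | nil => simp at hne
  | cons w ws' =>
    obtain ⟨hw, hsp⟩ := h w (by simp)
    cases w with
    | nil => simp at hw
    | cons c w' =>
      cases ws' with
      | nil => exact ⟨c, w', by simp [PySem.Chars.join_singleton], hsp c (by simp)⟩
      | cons v ws'' =>
        refine ⟨c, w' ++ [' '] ++ PySem.Chars.join [' '] (v :: ws''), ?_, hsp c (by simp)⟩
        rw [PySem.Chars.join_cons_cons]
        simp

theorem join_last (ws : List (List Char)) (h : pvWds ws) (hne : ws ≠ []) :
    ∃ t c, PySem.Chars.join [' '] ws = t ++ [c] ∧ PySem.Chars.isspace c = false := by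
  induction ws with
  | nil => simp at hne
  | cons w ws ih =>
    cases ws with
    | nil =>
      obtain ⟨hw, hsp⟩ := h w (by simp)
      obtain ⟨t, c, rfl⟩ := (List.eq_nil_or_concat w).resolve_left hw
      exact ⟨t, c, by simp [PySem.Chars.join_singleton], hsp c (by simp)⟩
    | cons v ws' =>
      obtain ⟨t, c, ht, hc⟩ := ih (fun u hu => h u (by simp [hu])) (by simp)
      refine ⟨w ++ [' '] ++ t, c, ?_, hc⟩
      rw [PySem.Chars.join_cons_cons, ht]
      simp

theorem strip_join (ws : List (List Char)) (h : pvWds ws) (hne : ws ≠ []) :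
    PySem.Chars.strip (PySem.Chars.join [' '] ws) = PySem.Chars.join [' '] ws := by
  obtain ⟨c, t, hct, hc⟩ := join_head ws h hne
  obtain ⟨t', c', hct', hc'⟩ := join_last ws h hne
  rw [PySem.Chars.strip, PySem.Chars.lstrip, hct, List.dropWhile_cons_of_neg (by simp [hc]), ← hct,
      hct', PySem.Chars.rstrip]
  simp [List.dropWhile_cons_of_neg, hc']

theorem join_ne_nil (ws : List (List Char)) (h : pvWds ws) (hne : ws ≠ []) :
    PySem.Chars.join [' '] ws ≠ [] := by
  obtain ⟨c, t, hct, _⟩ := join_head ws h hne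
  simp [hct]

-- pvNormChars s is the space-join of a word list
theorem pvNorm_canonical (s : List Char) :
    ∃ ws, pvWds ws ∧ pvNormChars s = PySem.Chars.join [' '] ws ∧ (ws = [] ↔ pvNormChars s = []) := by
  rw [pvNormChars]
  set raw := PySem.Chars.split₀ (PySem.Chars.replace (PySem.Chars.replace s ['\r'] [' ']) ['\n'] [' ']) with hraw
  have hwds : pvWds raw := split₀_wds _
  by_cases hne : raw = []
  · have hz : PySem.Chars.lower (PySem.Chars.strip (PySem.Chars.join [' '] raw)) = [] := by
      rw [hne]
      simp [PySem.Chars.join_nil, PySem.Chars.strip, PySem.Chars.lstrip, PySem.Chars.rstrip,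
        PySem.Chars.lower]
    exact ⟨[], by simp [pvWds], by rw [hz, PySem.Chars.join_nil], by simp [hz]⟩
  · refine ⟨raw.map PySem.Chars.lower, lower_wds raw hwds, ?_, ?_⟩
    · rw [strip_join raw hwds hne, lower_join]
    · rw [strip_join raw hwds hne, lower_join]
      constructor
      · intro h; exact absurd h (by simpa using hne)
      · intro h
        exact absurd h (join_ne_nil _ (lower_wds raw hwds) (by simpa using hne))

-- word-boundary parsing lemmas
theorem pvP1 (v : List Char) (w x y : List Char)
    (hv : ∀ c ∈ v, PySem.Chars.isspace c = false) (hw : ∀ c ∈ w, PySem.Chars.isspace c = false)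
    (h : (v ++ ' ' :: x) <+: (w ++ ' ' :: y)) : v = w ∧ x <+: y := by
  induction v generalizing w with
  | nil =>
    cases w with
    | nil => simpa using h
    | cons d w' =>
      exfalso
      simp at h
      obtain ⟨hd, -⟩ := h
      have := hw d (by simp)
      rw [← hd] at this
      simp [PySem.Chars.isspace] at this
  | cons c v' ih =>
    cases w with
    | nil =>
      exfalso
      simp at h
      obtain ⟨hd, -⟩ := h
      have := hv c (by simp)
      rw [hd] at this
      simp [PySem.Chars.isspace] at this
    | cons d w' =>
      simp only [List.cons_append, List.cons_prefix_cons] at h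
      obtain ⟨rfl, h⟩ := h
      obtain ⟨rfl, hxy⟩ := ih w' (fun e he => hv e (by simp [he])) (fun e he => hw e (by simp [he])) h
      exact ⟨rfl, hxy⟩

theorem pvP2 (vs ws : List (List Char)) (hv : pvWds vs) (hw : pvWds ws)
    (h : pvG vs <+: pvG ws) : vs <+: ws := by
  induction vs generalizing ws with
  | nil => simp
  | cons v vs' ih =>
    cases ws with
    | nil =>
      exfalso
      simp [pvG] at h
    | cons w ws' =>
      simp only [pvG] at h
      obtain ⟨rfl, h'⟩ := pvP1 v w _ _ (hv v (by simp)).2 (hw w (by simp)).2 h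
      exact List.cons_prefix_cons.mpr ⟨rfl, ih ws' (fun u hu => hv u (by simp [hu])) (fun u hu => hw u (by simp [hu])) h'⟩

theorem pvP3 (w r T : List Char) (hw : ∀ c ∈ w, PySem.Chars.isspace c = false)
    (h : T <:+: (w ++ ' ' :: r)) (hT : T.head? = some ' ') : T <:+: (' ' :: r) := by
  induction w with
  | nil => simpa using h
  | cons c w' ih =>
    rw [List.cons_append, List.infix_cons_iff] at h
    rcases h with h | h
    · exfalso
      cases T with
      | nil => simp at hT
      | cons t T' =>
        simp at hT
        subst hT
        simp [List.cons_prefix_cons] at h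
        obtain ⟨hc, -⟩ := h
        have := hw c (by simp)
        rw [← hc] at this
        simp [PySem.Chars.isspace] at this
    · exact ih (fun d hd => hw d (by simp [hd])) h

theorem pvP4 (ws vs : List (List Char)) (hw : pvWds ws) (hv : pvWds vs) (hvne : vs ≠ [])
    (h : (' ' :: pvG vs) <:+: (' ' :: pvG ws)) : vs <:+: ws := by
  induction ws with
  | nil =>
    exfalso
    cases vs with
    | nil => simp at hvne
    | cons v vs' =>
      obtain ⟨hne, -⟩ := hv v (by simp)
      have hlen := h.length_le
      cases v with
      | nil => exact hne rfl
      | cons c v' => simp [pvG] at hlen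
  | cons w ws' ih =>
    rw [List.infix_cons_iff] at h
    rcases h with h | h
    · rw [List.cons_prefix_cons] at h
      exact (pvP2 vs (w :: ws') hv hw h.2).isInfix
    · simp only [pvG] at h
      have h' := pvP3 w _ _ (hw w (by simp)).2 h (by simp)
      exact (ih (fun u hu => hw u (by simp [hu])) h').trans (List.infix_cons (List.infix_refl _))

theorem pvP5 (ws vs : List (List Char)) (h : vs <:+: ws) :
    (' ' :: pvG vs) <:+: (' ' :: pvG ws) := by
  obtain ⟨a, b, rfl⟩ := h
  rw [pvG_append, pvG_append]
  cases a with
  | nil => exact ⟨[], pvG b, by simp [pvG]⟩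
  | cons w a' =>
    obtain ⟨X, hX⟩ := pvG_concat_space (w :: a') (by simp)
    rw [hX]
    exact ⟨' ' :: X, pvG b, by simp⟩

theorem pvMain (ws vs : List (List Char)) (hw : pvWds ws) (hv : pvWds vs) (hvne : vs ≠ []) :
    ((' ' :: pvG vs) <:+: (' ' :: pvG ws)) ↔ vs <:+: ws :=
  ⟨pvP4 ws vs hw hv hvne, pvP5 ws vs⟩

-- the window scan decides infixhood
theorem pvWin_iff (vs ws : List (List Char)) : pvSublistWin vs ws = true ↔ vs <:+: ws := by
  rw [pvSublistWin]
  simp only [List.any_eq_true, List.mem_range, beq_iff_eq]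
  constructor
  · rintro ⟨i, -, hi⟩
    have h1 : vs <+: ws.drop i := by
      rw [List.prefix_iff_eq_take, ← hi]
      congr 1
      rw [← hi]
      simp [List.length_take]
    exact h1.isInfix.trans (List.drop_suffix i ws).isInfix
  · rintro ⟨p, q, rfl⟩
    refine ⟨p.length, by simp; omega, ?_⟩
    rw [List.append_assoc, List.drop_left]
    simp

-- ===== VERDICT (by name: the statement is the Claim_ definition above) =====
theorem signal_contains_py_spec : Claim_equal_signal_contains_py := by
  intro signal_text token _
  unfold Spec_signal_contains_py signal_contains_py signal_contains_py_alt
  obtain ⟨ws, hws, hns, hnsface⟩ := pvNorm_canonical signal_text.toList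
  obtain ⟨vs, hvs, hnt, hntface⟩ := pvNorm_canonical token.toList
  by_cases hse : pvNormChars signal_text.toList = []
  · rw [if_pos (by simp [hse]), if_pos (by simp [hse])]
  by_cases hte : pvNormChars token.toList = []
  · rw [if_pos (by simp [hte]), if_pos (by simp [hte])]
  have hwsne : ws ≠ [] := fun h => hse (hnsface.mp h)
  have hvsne : vs ≠ [] := fun h => hte (hntface.mp h)
  have hcond : ¬(((pvNormChars signal_text.toList).isEmpty || (pvNormChars token.toList).isEmpty) = true) := by
    simp [List.isEmpty_iff, hse, hte]
  rw [if_neg hcond, if_neg hcond]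
  by_cases hascii : ((pvNormChars token.toList).any fun c => decide (127 < c.toNat)) = true
  · rw [if_pos hascii, if_pos hascii]
  · rw [if_neg hascii, if_neg hascii]
    rw [hns, hnt, split₀_join ws hws, split₀_join vs hvs]
    rw [Bool.eq_iff_iff, PySem.Chars.isIn_iff_infix, pvWin_iff]
    have e1 : ' ' :: (PySem.Chars.join [' '] vs ++ [' ']) = ' ' :: pvG vs := by rw [pvG_eq_join vs hvsne]
    have e2 : ' ' :: (PySem.Chars.join [' '] ws ++ [' ']) = ' ' :: pvG ws := by rw [pvG_eq_join ws hwsne]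
    rw [show (' ' :: PySem.Chars.join [' '] vs ++ [' ']) = ' ' :: pvG vs from e1,
        show (' ' :: PySem.Chars.join [' '] ws ++ [' ']) = ' ' :: pvG ws from e2]
    exact pvMain ws vs hws hvs hvsne
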